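-- pv_equiv track=rewrite | github.com/diyorbekbaxromovv/Python-5-month-NT | 10-lesson multiprocessing/homework/ex1.py | function
-- ===== SOURCE A (Python) =====
-- def function(numlist):
--
--     if not numlist:
--         return 1
--
--     sorted_list = sorted(numlist)
--
--     for i, num in enumerate(sorted_list, start=1):
--         if i != num:
--             return i
--
--
--     return sorted_list[-1] + 1
-- ===== SOURCE B (Python) =====
-- def function(numlist):
--     # Count occurrences once; the sorted prefix can only be 1,2,3,... so walk
--     # k upward through the counter instead of sorting.
--     if any(x < 1 for x in numlist):
--         return 1
--     cnt = {}
--     for x in numlist: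
--         cnt[x] = cnt.get(x, 0) + 1
--     k = 1
--     while True:
--         c = cnt.get(k, 0)
--         if c == 0:
--             return k
--         if c >= 2:
--             return k + 1
--         k += 1
-- ===== Notes on version B (the rewrite author's own statement) =====
-- stated objective: faster
-- what changed: Replaces sort-then-scan with a one-pass hash counter: since a matching prefix of the sorted list can only be 1,2,3,..., B walks k upward through the counts (count 0 -> k, count >= 2 -> k+1) without sorting.
import Mathlib
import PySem

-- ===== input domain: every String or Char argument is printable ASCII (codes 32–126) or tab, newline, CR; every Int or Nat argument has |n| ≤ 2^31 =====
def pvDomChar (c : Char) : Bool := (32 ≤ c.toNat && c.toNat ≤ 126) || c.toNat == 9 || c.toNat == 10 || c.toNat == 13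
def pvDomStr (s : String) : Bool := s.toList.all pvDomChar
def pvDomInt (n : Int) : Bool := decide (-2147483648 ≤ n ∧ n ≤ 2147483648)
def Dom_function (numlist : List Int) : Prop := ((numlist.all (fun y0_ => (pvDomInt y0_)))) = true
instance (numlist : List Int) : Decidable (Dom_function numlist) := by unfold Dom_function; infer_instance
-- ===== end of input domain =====

-- B replaces A's sort-then-scan by a one-pass hash counter walked upward from k = 1 (objective: faster).

-- ===== PORT A =====
-- 'for i, num in enumerate(sorted_list, start=1): if i != num: return i'
def aScan : List Int → Int → Option Int
  | [], _ => none
  | num :: rest, i => if i ≠ num then some i else aScan rest (i + 1)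

def function (numlist : List Int) : Int :=
  if numlist = [] then 1
  else
    let sorted_list := PySem.List.sorted numlist (fun x => x) false
    match aScan sorted_list 1 with
    | some i => i
    | none => (PySem.List.pyGet? sorted_list (-1)).getD 0 + 1
      -- sorted_list is nonempty here, so sorted_list[-1] never raises; .getD 0 is never taken

-- ===== PORT B =====
-- the 'while True' loop; fuel numlist.length + 1 always suffices (each continue consumes a
-- distinct value of count 1), the fuel-0 branch is unreachable
def bLoop (cnt : PySem.Dict Int Int) : Nat → Int → Int
  | 0, _ => 0
  | fuel + 1, k =>
    let c := cnt.getD k 0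
    if c = 0 then k
    else if 2 ≤ c then k + 1
    else bLoop cnt fuel (k + 1)

def function_alt (numlist : List Int) : Int :=
  if numlist.any (fun x => x < 1) then 1
  else
    let cnt := numlist.foldl (fun d x => d.modify x 0 (· + 1)) PySem.Dict.empty
    bLoop cnt (numlist.length + 1) 1

-- ===== PRECONDITION & SPEC =====
def Spec_function (numlist : List Int) (out : Int) : Prop := out = function_alt numlist
instance (numlist : List Int) (out : Int) : Decidable (Spec_function numlist out) := by unfold Spec_function; infer_instance

-- ===== CLAIM (what is proved, stated in full; the proofs are below) =====
def Claim_equal_function : Prop := ∀ (numlist : List Int), Dom_function numlist → Spec_function numlist (function numlist)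

-- ===== LEMMAS AND PROOFS =====

-- abstract view of A's scan-plus-fallback on a remaining suffix starting at index k
def afk : List Int → Int → Int
  | [], k => k
  | num :: rest, k => if k ≠ num then k else afk rest (k + 1)

theorem aScan_afk : ∀ (s : List Int) (k : Int), s ≠ [] →
    (match aScan s k with
     | some i => i
     | none => s.getLast?.getD 0 + 1) = afk s k := by
  intro s
  induction s with
  | nil => intro k h; exact absurd rfl h
  | cons x rest ih =>
    intro k _
    by_cases hk : k ≠ x
    · simp [aScan, afk, hk]
    · cases rest with
      | nil =>
        push_neg at hk
        simp [aScan, afk, hk]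
      | cons y t =>
        have hnil : (y :: t) ≠ [] := by simp
        have := ih (k + 1) hnil
        simp only [aScan, afk, hk, if_neg, if_false, reduceIte] at *
        simpa [List.getLast?] using this

theorem sorted_head_eq (s : List Int) (k : Int) (hs : s.Sorted (· ≤ ·))
    (hk : ∀ x ∈ s, k ≤ x) (hc : 0 < s.count k) : ∃ t, s = k :: t := by
  cases s with
  | nil => simp at hc
  | cons x t =>
    have hmem : k ∈ x :: t := List.count_pos_iff.mp hc
    have hxk : k ≤ x := hk x (by simp)
    rcases List.mem_cons.mp hmem with h | h
    · exact ⟨t, by rw [h]⟩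
    · have : x ≤ k := (List.pairwise_cons.mp hs).1 k h
      exact ⟨t, by rw [le_antisymm this hxk]⟩

theorem bLoop_afk (d : PySem.Dict Int Int) :
    ∀ (fuel : Nat) (s : List Int) (k : Int), s.length < fuel →
      s.Sorted (· ≤ ·) → (∀ x ∈ s, k ≤ x) →
      (∀ j, k ≤ j → d.getD j 0 = (s.count j : Int)) →
      bLoop d fuel k = afk s k := by
  intro fuel
  induction fuel with
  | zero => intro s k h; omega
  | succ f ih =>
    intro s k hlen hs hk hd
    have hdk := hd k le_rfl
    by_cases h0 : s.count k = 0
    · -- count 0: B returns k; A's next element (if any) differs from k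
      have hb : bLoop d (f + 1) k = k := by simp [bLoop, hdk, h0]
      rw [hb]
      cases s with
      | nil => simp [afk]
      | cons x t =>
        have hxne : k ≠ x := by
          intro he
          have hmem : k ∈ x :: t := by rw [he]; simp
          exact absurd h0 (List.count_pos_iff.mpr hmem).ne'
        simp [afk, hxne]
    · obtain ⟨t, ht⟩ := sorted_head_eq s k hs hk (Nat.pos_of_ne_zero h0)
      subst ht
      by_cases h2 : 2 ≤ (k :: t).count k
      · -- duplicate head: B returns k+1; sorted list starts k, k
        have hb : bLoop d (f + 1) k = k + 1 := by
          simp only [bLoop]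
          rw [hdk]
          rw [if_neg (by exact_mod_cast h0), if_pos (by exact_mod_cast h2)]
        rw [hb]
        have hcs : List.count k (k :: t) = List.count k t + 1 := by simp
        have htc : 0 < t.count k := by omega
        obtain ⟨u, hu⟩ := sorted_head_eq t k (List.Sorted.of_cons hs)
          (fun x hx => hk x (by simp [hx])) htc
        subst hu
        simp [afk]
      · -- count 1: both advance to k+1 on the tail
        have hcs : List.count k (k :: t) = List.count k t + 1 := by simp
        have hc1 : (k :: t).count k = 1 := by omega
        have htc0 : t.count k = 0 := by omega
        have hb : bLoop d (f + 1) k = bLoop d f (k + 1) := by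
          simp only [bLoop]
          rw [hdk, hc1]
          norm_num
        rw [hb]
        have hstep : afk (k :: t) k = afk t (k + 1) := by simp [afk]
        rw [hstep]
        apply ih t (k + 1)
        · simpa using hlen
        · exact List.Sorted.of_cons hs
        · intro x hx
          have h1 : k ≤ x := hk x (by simp [hx])
          have h2 : x ≠ k := by
            intro he; rw [he] at hx
            exact absurd (List.count_pos_iff.mpr hx) (by omega)
          omega
        · intro j hj
          have : List.count j (k :: t) = List.count j t := by
            simp [List.count_cons]
            omega
          rw [← this]
          exact hd j (by omega)

-- ===== VERDICT (by name: the statement is the Claim_ definition above) =====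
theorem function_spec : Claim_equal_function := by
  intro numlist _
  unfold Spec_function function function_alt
  by_cases hnil : numlist = []
  · subst hnil; decide
  · simp only [hnil, if_false, reduceIte]
    set s := PySem.List.sorted numlist (fun x => x) false with hsdef
    have hperm : s.Perm numlist := PySem.List.sorted_perm numlist (fun x => x) false
    have hsorted : s.Sorted (· ≤ ·) := by
      have := PySem.List.sorted_pairwise numlist (fun x => x)
      simpa [List.Sorted] using this
    have hsnil : s ≠ [] := by
      intro h
      have hl := hperm.length_eq
      rw [h] at hl
      cases numlist with
      | nil => exact hnil rfl
      | cons a l => simp at hl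
    by_cases hneg : numlist.any (fun x => x < 1)
    · -- some element < 1: A mismatches immediately at index 1
      simp only [hneg, if_true, reduceIte]
      obtain ⟨x, hx, hx1⟩ := List.any_eq_true.mp hneg
      have hx1 : x < 1 := by simpa using hx1
      cases hs : s with
      | nil => exact absurd hs hsnil
      | cons m t =>
        have hms : PySem.List.sorted numlist (fun x => x) false = m :: t := by
          rw [← hsdef]; exact hs
        have hm : m ≤ x :=
          PySem.List.key_head_sorted_le numlist (fun x => x) hms x hx
        have : (1 : Int) ≠ m := by omega
        simp [aScan, this]
    · -- all elements ≥ 1: both sides compute afk s 1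
      simp only [hneg, if_false, reduceIte]
      have hall : ∀ x ∈ s, (1 : Int) ≤ x := by
        intro x hx
        have hx' : x ∈ numlist := hperm.mem_iff.mp hx
        by_contra h
        exact hneg (List.any_eq_true.mpr ⟨x, hx', by simp; omega⟩)
      have hd : ∀ j : Int, (1 : Int) ≤ j →
          (numlist.foldl (fun d x => d.modify x 0 (· + 1)) PySem.Dict.empty).getD j 0
            = (s.count j : Int) := by
        intro j _
        rw [PySem.Dict.getD_foldl_modify_add_one]
        rw [PySem.Dict.getD_empty]
        rw [hperm.count_eq]
        ring
      have hB := bLoop_afk (numlist.foldl (fun d x => d.modify x 0 (· + 1)) PySem.Dict.empty)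
        (numlist.length + 1) s 1 (by simp [hperm.length_eq]) hsorted hall hd
      have hA := aScan_afk s 1 hsnil
      rw [PySem.List.pyGet?_neg_one]
      rw [hA] at *
      exact hB.symm ▸ rfl
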